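-- pv_equiv track=rewrite | github.com/luctivud/CP-Submissions | TopCoder/MarblePicking.py | fewestColors
-- ===== SOURCE A (Python) =====
-- def fewestColors(marbles, count):
-- 	from collections import Counter
-- 	from functools import reduce
-- 	c = reduce(Counter.__add__, [Counter(i) for i in marbles])
-- 	ans = 0
-- 	for k, v in sorted(c.items(), key = lambda x: -x[1]):
-- 		if count <= 0:
-- 			break
-- 		count -= v
-- 		ans += 1
-- 	return ans
-- ===== SOURCE B (Python) =====
-- def fewestColors(marbles, count):
--     # Counting-sort/bucket algorithm: no comparison sort and no per-color greedy loop.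
--     # Tally characters once, histogram the frequencies (buckets[f] = how many colors
--     # occur exactly f times), then walk the frequency values from the largest down,
--     # consuming whole buckets with block arithmetic: if the remaining need finishes
--     # inside a bucket of frequency f, exactly ceil(remaining/f) more colors are needed.
--     if count <= 0:
--         return 0
--     freq = {}
--     for s in marbles:
--         for ch in s:
--             freq[ch] = freq.get(ch, 0) + 1
--     buckets = {}
--     for v in freq.values():
--         buckets[v] = buckets.get(v, 0) + 1
--     maxf = max(freq.values(), default=0)
--     colors = 0
--     remaining = count
--     for f in range(maxf, 0, -1):
--         m = buckets.get(f, 0)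
--         if m == 0:
--             continue
--         if remaining <= f * m:
--             return colors + (remaining + f - 1) // f
--         remaining -= f * m
--         colors += m
--     return colors
-- ===== Notes on version B (the rewrite author's own statement) =====
-- stated objective: faster
-- what changed: B replaces A's sort-then-greedy (per-string Counters merged pairwise by reduce(Counter.__add__), items sorted by descending frequency, one greedy step per color) with a counting-sort/bucket scheme: tally all characters once, histogram the frequencies, then walk frequency values from the largest down, consuming whole buckets by block arithmetic with a ceiling division inside the final bucket — no pairwise merges, no comparison sort, no per-color loop.
import Mathlib
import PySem

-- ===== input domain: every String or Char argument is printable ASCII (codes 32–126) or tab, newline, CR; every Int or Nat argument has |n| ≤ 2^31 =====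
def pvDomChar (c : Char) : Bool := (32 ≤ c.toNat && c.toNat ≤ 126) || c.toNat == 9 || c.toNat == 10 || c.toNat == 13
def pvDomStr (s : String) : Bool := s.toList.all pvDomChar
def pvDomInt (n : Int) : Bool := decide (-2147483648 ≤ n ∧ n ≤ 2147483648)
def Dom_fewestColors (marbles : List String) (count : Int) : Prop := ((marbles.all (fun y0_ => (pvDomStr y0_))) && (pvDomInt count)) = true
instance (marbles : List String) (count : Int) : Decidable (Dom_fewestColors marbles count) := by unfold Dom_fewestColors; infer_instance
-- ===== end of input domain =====

-- B replaces A's sort-then-greedy (per-string Counters merged by reduce(Counter.__add__), items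
-- sorted by descending frequency, one greedy step per color) with a counting-sort/bucket scheme:
-- one tally of all characters, a histogram of the frequencies, then a walk over the frequency
-- VALUES from the largest down that consumes whole buckets by block arithmetic (ceil division
-- inside the final bucket) — no pairwise merges, no comparison sort, no per-color loop (objective:
-- faster, measured; equivalence is about the return value).

-- ===== PORT A =====
-- Counter(i) for a string i
def pyCounterOfStr (s : String) : PySem.Dict Char Int := PySem.Dict.counter s.toList

-- Counter.__add__ (CPython: keep positive sums of self's keys in order, then other's new positive keys)
def pyCounterAdd (a b : PySem.Dict Char Int) : PySem.Dict Char Int :=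
  let r := a.items.foldl (fun r kv =>
      if 0 < kv.2 + b.getD kv.1 0 then r.insert kv.1 (kv.2 + b.getD kv.1 0) else r)
    PySem.Dict.empty
  b.items.foldl (fun r kv =>
      if a.contains kv.1 = false ∧ 0 < kv.2 then r.insert kv.1 kv.2 else r) r

-- A's for-loop with its break
def fewestLoop : List (Char × Int) → Int → Int → Int
  | [], _, ans => ans
  | kv :: rest, count, ans =>
      if count ≤ 0 then ans else fewestLoop rest (count - kv.2) (ans + 1)

def fewestColors (marbles : List String) (count : Int) : Int :=
  match marbles.map pyCounterOfStr with
  | [] => 0   -- Python's reduce raises TypeError on an empty list; excluded by Pre_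
  | c0 :: rest =>
      fewestLoop (PySem.List.sorted (rest.foldl pyCounterAdd c0).items (fun x => -x.2) false) count 0

-- ===== PORT B =====
-- B's 'for f in range(maxf, 0, -1)' loop with its 'continue' and early return
def bLoop (buckets : PySem.Dict Int Int) : List Int → Int → Int → Int
  | [], colors, _ => colors
  | f :: rest, colors, remaining =>
      let m := buckets.getD f 0
      if m = 0 then bLoop buckets rest colors remaining
      else if remaining ≤ f * m then colors + PySem.Int.floordiv (remaining + f - 1) f
      else bLoop buckets rest (colors + m) (remaining - f * m)

def fewestColors_alt (marbles : List String) (count : Int) : Int :=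
  if count ≤ 0 then 0
  else
    let freq := marbles.foldl
      (fun d s => s.toList.foldl (fun d ch => d.insert ch (d.getD ch 0 + 1)) d)
      PySem.Dict.empty
    let buckets := freq.values.foldl (fun d v => d.insert v (d.getD v 0 + 1)) PySem.Dict.empty
    let maxf := PySem.List.maxD freq.values (fun v => v) 0
    bLoop buckets (PySem.List.pyRange maxf 0 (-1)) 0 count

-- ===== PRECONDITION & SPEC =====
-- Pre_ excludes only the empty marble list, on which A's reduce(...) raises TypeError.
def Pre_fewestColors (marbles : List String) (count : Int) : Prop := marbles ≠ []
instance (marbles : List String) (count : Int) : Decidable (Pre_fewestColors marbles count) := by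
  unfold Pre_fewestColors; infer_instance

def pvWitness_fewestColors : List String × Int := (["ab", "b"], 2)

def Spec_fewestColors (marbles : List String) (count : Int) (out : Int) : Prop := out = fewestColors_alt marbles count
instance (marbles : List String) (count : Int) (out : Int) : Decidable (Spec_fewestColors marbles count out) := by unfold Spec_fewestColors; infer_instance

-- ===== CLAIM (what is proved, stated in full; the proofs are below) =====
def Claim_equal_fewestColors : Prop := ∀ (marbles : List String) (count : Int), Dom_fewestColors marbles count → Pre_fewestColors marbles count → Spec_fewestColors marbles count (fewestColors marbles count)

-- ===== LEMMAS AND PROOFS =====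

-- Set.update decomposed as an append of the not-yet-seen elements of the right argument
theorem pv_update_eq_filter {s : PySem.Set Char} {l : List Char} :
    PySem.Set.update s l = s ++ (PySem.Set.ofList l).filter (fun y => decide (y ∉ s)) := by
  induction l using List.reverseRecOn with
  | nil => simp [PySem.Set.update_nil, PySem.Set.ofList]
  | append_singleton ys y ih =>
    rw [PySem.Set.update_append, ih, PySem.Set.ofList_append_singleton,
        PySem.Set.update_cons, PySem.Set.update_nil, PySem.Set.add_eq_ite,
        PySem.Set.add_eq_ite]
    by_cases hy : y ∈ PySem.Set.ofList ys
    · simp [hy]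
    · by_cases hs : y ∈ s
      · simp [hy, hs, List.filter_append]
      · simp [hy, hs, List.filter_append]

theorem pv_counterAdd_counter (xs l : List Char) :
    pyCounterAdd (PySem.Dict.counter xs) (PySem.Dict.counter l) = PySem.Dict.counter (xs ++ l) := by
  apply PySem.Dict.ext
  unfold pyCounterAdd
  simp only [PySem.Dict.items_counter, List.foldl_map]
  have h1 : (PySem.Set.ofList xs).foldl
      (fun r k => if 0 < ((xs.count k : Int)) + (PySem.Dict.counter l).getD k 0
        then r.insert k ((xs.count k : Int) + (PySem.Dict.counter l).getD k 0) else r)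
      (PySem.Dict.empty) =
      (PySem.Set.ofList xs).foldl
      (fun r k => r.insert k ((xs.count k : Int) + (l.count k : Int))) PySem.Dict.empty := by
    apply PySem.List.foldl_congr_mem
    intro acc k hk
    have hkx : k ∈ xs := (PySem.Set.mem_ofList xs k).mp hk
    have : 1 ≤ xs.count k := List.one_le_count_iff.mpr hkx
    rw [PySem.Dict.getD_counter, if_pos (by positivity)]
  rw [h1]
  have hr1 : ((PySem.Set.ofList xs).foldl
      (fun r k => r.insert k ((xs.count k : Int) + (l.count k : Int))) PySem.Dict.empty).items
      = (PySem.Set.ofList xs).map (fun k => (k, (xs.count k : Int) + (l.count k : Int))) := by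
    rw [PySem.Dict.items_foldl_insert_fresh _ _ _ _ (fun a _ => PySem.Dict.contains_empty a)
      (by simp [PySem.Set.nodup_ofList xs])]
    rfl
  set r1 := (PySem.Set.ofList xs).foldl
      (fun r k => r.insert k ((xs.count k : Int) + (l.count k : Int))) PySem.Dict.empty with hr1def
  -- phase 2
  have h2 : (PySem.Set.ofList l).foldl
      (fun r k => if (PySem.Dict.counter xs).contains k = false ∧ 0 < ((l.count k : Int))
        then r.insert k ((l.count k : Int)) else r) r1
      = (PySem.Set.ofList l).foldl
      (fun r k => if (k ∈ xs → False) then r.insert k ((l.count k : Int)) else r) r1 := by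
    apply PySem.List.foldl_congr_mem
    intro acc k hk
    have hkl : k ∈ l := (PySem.Set.mem_ofList l k).mp hk
    have hc : 1 ≤ l.count k := List.one_le_count_iff.mpr hkl
    rw [PySem.Dict.contains_counter]
    by_cases hx : k ∈ xs
    · rw [if_neg (by simp [hx]), if_neg (by simp [hx])]
    · rw [if_pos ⟨by simp [hx], by positivity⟩, if_pos (by simp [hx])]
  rw [h2, PySem.List.foldl_ite_eq_foldl_filter]
  have hfc : (PySem.Set.ofList l).filter (fun k => decide (k ∈ xs → False))
      = (PySem.Set.ofList l).filter (fun y => decide (y ∉ PySem.Set.ofList xs)) := by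
    apply List.filter_congr; intro k _; simp [PySem.Set.mem_ofList]
  rw [hfc]
  have hins : ((((PySem.Set.ofList l).filter (fun y => decide (y ∉ PySem.Set.ofList xs))).foldl
      (fun r k => r.insert k ((l.count k : Int))) r1)).items
      = r1.items ++ ((PySem.Set.ofList l).filter (fun y => decide (y ∉ PySem.Set.ofList xs))).map
          (fun k => (k, (l.count k : Int))) := by
    apply PySem.Dict.items_foldl_insert_fresh
    · intro k hk
      have hknx : k ∉ PySem.Set.ofList xs := by
        have := List.of_mem_filter hk; simpa using this
      rw [PySem.Dict.contains_eq_decide_mem_keys]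
      simp only [PySem.Dict.keys, hr1, List.map_map]
      simpa [Function.comp] using hknx
    · simpa using (PySem.Set.nodup_ofList l).filter _
  rw [hins, hr1]
  -- now the RHS
  rw [PySem.Set.ofList_append, pv_update_eq_filter, List.map_append]
  congr 1
  · apply List.map_congr_left
    intro k hk
    have hkx : k ∈ xs := (PySem.Set.mem_ofList xs k).mp hk
    simp [List.count_append]
  · apply List.map_congr_left
    intro k hk
    have hknx : k ∉ xs := by
      have := List.of_mem_filter hk; simp [PySem.Set.mem_ofList] at this; exact this
    simp [List.count_append, List.count_eq_zero.mpr hknx]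

-- reduce(Counter.__add__, [Counter(s) for s in marbles]) is the counter of all characters
theorem pv_reduce_counter (ms : List String) (xs : List Char) :
    (ms.map pyCounterOfStr).foldl pyCounterAdd (PySem.Dict.counter xs)
      = PySem.Dict.counter (xs ++ ms.flatMap (·.toList)) := by
  induction ms generalizing xs with
  | nil => simp
  | cons m ms ih =>
    simp only [List.map_cons, List.foldl_cons, List.flatMap_cons, pyCounterOfStr]
    rw [pv_counterAdd_counter, ih, List.append_assoc]

-- B's nested tally loop is the counter of all characters
theorem pv_alt_dict (marbles : List String) :
    marbles.foldl (fun d s => s.toList.foldl (fun d ch => d.insert ch (d.getD ch 0 + 1)) d)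
        PySem.Dict.empty
      = PySem.Dict.counter (marbles.flatMap (·.toList)) := by
  rw [← PySem.Dict.foldl_insert_getD_add_one_eq_counter, List.foldl_flatMap]

-- A's loop only reads the second components
def pvGreedy : List Int → Int → Int → Int
  | [], _, ans => ans
  | v :: rest, count, ans =>
      if count ≤ 0 then ans else pvGreedy rest (count - v) (ans + 1)

theorem pv_fewestLoop_eq_greedy (L : List (Char × Int)) (c a : Int) :
    fewestLoop L c a = pvGreedy (L.map (·.2)) c a := by
  induction L generalizing c a with
  | nil => rfl
  | cons kv rest ih => simp only [fewestLoop, List.map_cons, pvGreedy]; split_ifs <;> simp [ih]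

theorem pv_greedy_nonpos (vals : List Int) (c a : Int) (h : c ≤ 0) : pvGreedy vals c a = a := by
  cases vals <;> simp [pvGreedy, h]

-- the values of A's sorted items are the descending-sorted frequency values
theorem pv_sorted_vals (d : PySem.Dict Char Int) :
    (PySem.List.sorted d.items (fun x => -x.2) false).map (·.2)
      = PySem.List.sorted d.values (fun v => v) true := by
  apply PySem.List.eq_of_perm_of_pairwise_le_of_injective (key := fun v : Int => -v)
    (fun a b h => by simpa using h)
  · exact ((PySem.List.sorted_perm _ _ _).map _).trans (PySem.List.sorted_perm d.values _ _).symm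
  · exact (PySem.List.sorted_pairwise d.items (fun x => -x.2)).map _ (fun _ _ hab => hab)
  · exact (PySem.List.sorted_pairwise_rev d.values (fun v => v)).imp (fun h => by simp; omega)

-- a ceiling-division identity: ceil(c/f) = ceil((c-f)/f) + 1
theorem pv_ceil_step (c f : Int) (hf : 0 < f) :
    (c + f - 1) / f = (c - 1) / f + 1 := by
  have : c + f - 1 = (c - 1) + 1 * f := by ring
  rw [this, Int.add_mul_ediv_right _ _ (by omega : f ≠ 0)]

-- the greedy loop over a block of m equal frequencies f, in closed form
theorem pv_greedy_replicate (m : Nat) (f c a : Int) (rest : List Int) (hf : 0 < f) :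
    pvGreedy (List.replicate m f ++ rest) c a =
      if c ≤ 0 then a
      else if c ≤ f * m then a + (c + f - 1) / f
      else pvGreedy rest (c - f * m) (a + m) := by
  induction m generalizing c a with
  | zero =>
    by_cases hc : c ≤ 0
    · simp [hc, pv_greedy_nonpos _ _ _ hc]
    · simp only [List.replicate, List.nil_append, Nat.cast_zero, mul_zero]
      rw [if_neg hc, if_neg hc]
      simp
  | succ m ih =>
    by_cases hc : c ≤ 0
    · simp [List.replicate_succ, pvGreedy, hc]
    · have hfm : (0:Int) ≤ f * (m:Int) := by positivity
      have hexp : f * (((m:Nat) + 1 : Nat) : Int) = f * (m:Int) + f := by push_cast; ring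
      rw [List.replicate_succ, List.cons_append]
      simp only [pvGreedy, if_neg hc]
      rw [ih (c - f) (a + 1)]
      by_cases h1 : c - f ≤ 0
      · rw [if_pos h1, if_pos (by linarith : c ≤ f * (((m:Nat) + 1 : Nat) : Int))]
        rw [pv_ceil_step c f hf, Int.ediv_eq_zero_of_lt (by omega) (by omega)]
        ring
      · rw [if_neg h1]
        by_cases h2 : c - f ≤ f * (m:Int)
        · rw [if_pos h2, if_pos (by linarith : c ≤ f * (((m:Nat) + 1 : Nat) : Int)),
              pv_ceil_step c f hf]
          have h3 : c - f + f - 1 = c - 1 := by ring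
          rw [h3]; ring
        · rw [if_neg h2, if_neg (by intro h; exact h2 (by linarith) : ¬ c ≤ f * (((m:Nat) + 1 : Nat) : Int))]
          have h3 : c - f - f * (m:Int) = c - f * (((m:Nat) + 1 : Nat) : Int) := by push_cast; ring
          have h4 : a + 1 + (m:Int) = a + (((m:Nat) + 1 : Nat) : Int) := by push_cast; ring
          rw [h3, h4]

-- the greedy over blocks of equal frequencies = B's bucket loop
theorem pv_greedy_eq_bLoop (vals : List Int) (fs : List Int) (c a : Int)
    (hc : 0 < c) (hpos : ∀ f ∈ fs, 0 < f) :
    pvGreedy (fs.flatMap (fun f => List.replicate (vals.count f) f)) c a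
      = bLoop (PySem.Dict.counter vals) fs a c := by
  induction fs generalizing c a with
  | nil => simp [bLoop, pvGreedy]
  | cons f rest ih =>
    have hf : 0 < f := hpos f (by simp)
    have hrest : ∀ g ∈ rest, 0 < g := fun g hg => hpos g (by simp [hg])
    simp only [List.flatMap_cons, bLoop, PySem.Dict.getD_counter]
    rw [pv_greedy_replicate _ _ _ _ _ hf, if_neg (by omega : ¬ c ≤ 0)]
    by_cases hm : ((vals.count f : Nat) : Int) = 0
    · rw [if_pos hm, hm, mul_zero, sub_zero, add_zero, if_neg (by omega : ¬ c ≤ (0:Int))]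
      exact ih c a hc hrest
    · rw [if_neg hm]
      by_cases h2 : c ≤ f * ((vals.count f : Nat) : Int)
      · rw [if_pos h2, if_pos h2, PySem.Int.floordiv_eq_ediv_of_pos hf]
      · rw [if_neg h2, if_neg h2]
        exact ih _ _ (by linarith) hrest
-- count of x in a flatMap of replicate blocks over distinct block heads
theorem pv_count_flatMap (fs : List Int) (hnd : fs.Nodup) (cnt : Int → Nat) (x : Int) :
    (fs.flatMap (fun f => List.replicate (cnt f) f)).count x = if x ∈ fs then cnt x else 0 := by
  induction fs with
  | nil => simp
  | cons f rest ih =>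
    have hnd' := hnd.of_cons
    have hfnr : f ∉ rest := (List.nodup_cons.mp hnd).1
    simp only [List.flatMap_cons, List.count_append, List.count_replicate, ih hnd', List.mem_cons]
    by_cases hx : x = f
    · subst hx
      simp [hfnr]
    · simp [hx, Ne.symm hx]

-- pairwise ≥ for a flatMap of replicate blocks over strictly descending heads
theorem pv_pairwise_flatMap (fs : List Int) (hp : fs.Pairwise (fun a b => b < a)) (cnt : Int → Nat) :
    (fs.flatMap (fun f => List.replicate (cnt f) f)).Pairwise (fun a b => b ≤ a) := by
  induction fs with
  | nil => simp
  | cons f rest ih =>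
    rw [List.flatMap_cons, List.pairwise_append]
    refine ⟨List.pairwise_replicate.mpr (Or.inr le_rfl), ih hp.of_cons, ?_⟩
    intro x hx y hy
    obtain ⟨g, hg, hyg⟩ := List.mem_flatMap.mp hy
    have hxf : x = f := List.eq_of_mem_replicate hx
    have hyg' : y = g := List.eq_of_mem_replicate hyg
    have := (List.pairwise_cons.mp hp).1 g hg
    omega

-- the descending-sorted value list is the concatenation of the frequency buckets
theorem pv_sorted_eq_flatMap (vals : List Int) (maxf : Int)
    (hpos : ∀ v ∈ vals, 0 < v) (hmax : ∀ v ∈ vals, v ≤ maxf) :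
    PySem.List.sorted vals (fun v => v) true
      = (PySem.List.pyRange maxf 0 (-1)).flatMap (fun f => List.replicate (vals.count f) f) := by
  have hnd : (PySem.List.pyRange maxf 0 (-1)).Nodup := by
    rw [PySem.List.pyRange_neg_one_eq_reverse]
    exact List.nodup_reverse.mpr (PySem.List.nodup_pyRange_one _ _)
  apply PySem.List.eq_of_perm_of_pairwise_le_of_injective (key := fun v : Int => -v)
    (fun a b h => by simpa using h)
  · refine (PySem.List.sorted_perm _ _ _).trans (List.perm_iff_count.mpr fun x => ?_)
    rw [pv_count_flatMap _ hnd]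
    by_cases hx : x ∈ PySem.List.pyRange maxf 0 (-1)
    · simp [hx]
    · rw [if_neg hx]
      rw [PySem.List.mem_pyRange_neg_one] at hx
      refine (List.count_eq_zero.mpr fun hmem => hx ⟨hpos x hmem, hmax x hmem⟩)
  · exact (PySem.List.sorted_pairwise_rev vals (fun v => v)).imp (fun h => by simpa using h)
  · refine (pv_pairwise_flatMap _ ?_ _).imp (fun h => by simpa using h)
    rw [PySem.List.pyRange_neg_one_eq_reverse, List.pairwise_reverse]
    exact PySem.List.pairwise_lt_pyRange_one _ _
-- every frequency value of a counter is positive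
theorem pv_counter_values_pos {xs : List Char} {v : Int}
    (hv : v ∈ (PySem.Dict.counter xs).values) : 0 < v := by
  have : (PySem.Dict.counter xs).values
      = (PySem.Set.ofList xs).map (fun k => (xs.count k : Int)) := by
    show ((PySem.Dict.counter xs).items.map (·.2)) = _
    rw [PySem.Dict.items_counter, List.map_map]
    rfl
  rw [this, List.mem_map] at hv
  obtain ⟨k, hk, rfl⟩ := hv
  have : k ∈ xs := (PySem.Set.mem_ofList xs k).mp hk
  have := List.one_le_count_iff.mpr this
  omega

-- maxD with default is max? with getD
theorem pv_maxD_eq (xs : List Int) (d : Int) :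
    PySem.List.maxD xs (fun v => v) d = (PySem.List.max? xs (fun v => v)).getD d := by
  cases xs <;> rfl

-- ===== VERDICT (by name: the statement is the Claim_ definition above) =====
theorem fewestColors_spec : Claim_equal_fewestColors := by
  intro marbles count _ hpre
  unfold Spec_fewestColors
  match marbles with
  | [] => exact absurd rfl hpre
  | m :: ms =>
    unfold fewestColors fewestColors_alt
    simp only [List.map_cons]
    rw [pv_alt_dict]
    simp only [pyCounterOfStr]
    rw [pv_reduce_counter]
    simp only [List.flatMap_cons]
    rw [pv_fewestLoop_eq_greedy, pv_sorted_vals]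
    rw [PySem.Dict.foldl_insert_getD_add_one_eq_counter]
    set d := PySem.Dict.counter (m.toList ++ ms.flatMap (·.toList)) with hd
    by_cases hc : count ≤ 0
    · rw [if_pos hc, pv_greedy_nonpos _ _ _ hc]
    · rw [if_neg hc, pv_maxD_eq]
      set maxf := (PySem.List.max? d.values (fun v => v)).getD 0 with hmaxf
      have hmax : ∀ v ∈ d.values, v ≤ maxf := by
        intro v hv
        cases h : PySem.List.max? d.values (fun v => v) with
        | none =>
          exact absurd ((PySem.List.max?_eq_none_iff _ _).mp h ▸ hv) (List.not_mem_nil)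
        | some w =>
          have := PySem.List.max?_isMax h v hv
          simp [hmaxf, h, this]
      rw [pv_sorted_eq_flatMap d.values maxf (fun v hv => pv_counter_values_pos hv) hmax]
      exact pv_greedy_eq_bLoop d.values _ count 0 (by omega)
        (fun f hf => (PySem.List.mem_pyRange_neg_one.mp hf).1)
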